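-- pv_equiv track=rewrite | github.com/Jayden-Elliott/MRSEC-MOFs | feature_generation/node_element_feature.py | get_metals
-- ===== SOURCE A (Python) =====
-- def get_metals(formula: str):
--     metals = ["Li", "Be", "Na", "Mg", "Al", "K", "Ca", "Sc", "Ti", "V", "Cr", "Mn", "Fe", "Co", "Ni", "Cu", "Zn", "Ga", "Rb", "Sr", "Y", "Zr", "Nb", "Mo", "Tc", "Ru", "Rh", "Pd", "Ag", "Cd", "In", "Sn", "Cs", "Ba", "La", "Ce", "Pr", "Nd", "Pm", "Sm", "Eu", "Gd", "Tb", "Dy", "Ho", "Er", "Tm", "Yb", "Lu", "Hf", "Ta", "W", "Re", "Os", "Ir", "Pt", "Au", "Hg", "Tl", "Pb", "Bi", "Po", "Fr", "Ra", "Ac", "Th", "Pa", "U", "Np", "Pu", "Am", "Cm", "Bk", "Cf", "Es", "Fm", "Md", "No", "Lr", "Rf", "Db", "Sg", "Bh", "Hs", "Mt", "Ds", "Rg", "Cn"]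
--
--     metal1 = ""
--     metal2 = ""
--     for m in metals:
--         if m in formula:
--             if metal1 == "":
--                 metal1 = m
--             else:
--                 metal2 = m
--     if metal2 == "":
--         metal2 = metal1
--
--     return metal1, metal2
-- ===== SOURCE B (Python) =====
-- _METALS = ("Li Be Na Mg Al K Ca Sc Ti V Cr Mn Fe Co Ni Cu Zn Ga Rb Sr Y Zr Nb Mo "
--            "Tc Ru Rh Pd Ag Cd In Sn Cs Ba La Ce Pr Nd Pm Sm Eu Gd Tb Dy Ho Er Tm "
--            "Yb Lu Hf Ta W Re Os Ir Pt Au Hg Tl Pb Bi Po Fr Ra Ac Th Pa U Np Pu Am "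
--            "Cm Bk Cf Es Fm Md No Lr Rf Db Sg Bh Hs Mt Ds Rg Cn").split()
--
--
-- def _first_present(symbols, formula):
--     """First symbol of `symbols` that occurs in `formula`, '' if none (recursive)."""
--     if not symbols:
--         return ""
--     if symbols[0] in formula:
--         return symbols[0]
--     return _first_present(symbols[1:], formula)
--
--
-- def get_metals(formula: str):
--     # first match scanning forward, last match scanning backward;
--     # a lone match is re-found by the backward scan, so no fallback is needed
--     return (_first_present(_METALS, formula),
--             _first_present(_METALS[::-1], formula))
-- ===== Notes on version B (the rewrite author's own statement) =====
-- stated objective: simpler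
-- what changed: Replaced the single full-pass loop maintaining first/last state plus an empty-string fallback by one recursive short-circuiting search helper run twice, forward over the symbol table (kept as a split space-separated string) for the first match and backward over its reversal for the last; a lone match is re-found backward, so the fallback disappears.
import Mathlib
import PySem

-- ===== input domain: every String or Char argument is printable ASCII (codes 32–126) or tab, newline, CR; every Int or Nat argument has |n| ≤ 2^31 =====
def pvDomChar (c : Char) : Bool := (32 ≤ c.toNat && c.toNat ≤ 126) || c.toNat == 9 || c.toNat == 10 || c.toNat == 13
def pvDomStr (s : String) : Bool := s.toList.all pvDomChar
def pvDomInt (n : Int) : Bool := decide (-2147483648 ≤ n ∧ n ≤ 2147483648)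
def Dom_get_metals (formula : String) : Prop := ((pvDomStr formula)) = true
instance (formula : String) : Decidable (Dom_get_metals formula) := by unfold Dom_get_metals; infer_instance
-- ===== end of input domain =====

-- B replaces A's single full-pass first/last accumulating loop (plus empty-string fallback)
-- by a recursive short-circuiting search run forward for the first match and backward
-- (over the reversed table) for the last; objective: simpler.

-- ===== PORT A =====
-- literal port of A: the local metals list, one loop maintaining (metal1, metal2), then the fallback
def get_metals (formula : String) : String × String :=
  let metals : List String := ["Li", "Be", "Na", "Mg", "Al", "K", "Ca", "Sc", "Ti", "V", "Cr", "Mn", "Fe", "Co", "Ni", "Cu", "Zn", "Ga", "Rb", "Sr", "Y", "Zr", "Nb", "Mo", "Tc", "Ru", "Rh", "Pd", "Ag", "Cd", "In", "Sn", "Cs", "Ba", "La", "Ce", "Pr", "Nd", "Pm", "Sm", "Eu", "Gd", "Tb", "Dy", "Ho", "Er", "Tm", "Yb", "Lu", "Hf", "Ta", "W", "Re", "Os", "Ir", "Pt", "Au", "Hg", "Tl", "Pb", "Bi", "Po", "Fr", "Ra", "Ac", "Th", "Pa", "U", "Np", "Pu", "Am", "Cm", "Bk", "Cf", "Es", "Fm",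 "Md", "No", "Lr", "Rf", "Db", "Sg", "Bh", "Hs", "Mt", "Ds", "Rg", "Cn"]
  let r := metals.foldl
    (fun acc m =>
      if PySem.Str.isIn m formula then
        if acc.1 == "" then (m, acc.2) else (acc.1, m)
      else acc) ("", "")
  let metal2 := if r.2 == "" then r.1 else r.2
  (r.1, metal2)

-- ===== PORT B =====
-- B keeps the table as one space-separated string split into words (as Source B does)
def pvMetalTable : List String :=
  PySem.Str.split₀ "Li Be Na Mg Al K Ca Sc Ti V Cr Mn Fe Co Ni Cu Zn Ga Rb Sr Y Zr Nb Mo Tc Ru Rh Pd Ag Cd In Sn Cs Ba La Ce Pr Nd Pm Sm Eu Gd Tb Dy Ho Er Tm Yb Lu Hf Ta W Re Os Ir Pt Au Hg Tl Pb Bi Po Fr Ra Ac Th Pa U Np Pu Am Cm Bk Cf Es Fm Md No Lr Rf Db Sg Bh Hs Mt Ds Rg Cn"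

-- recursive port of Source B's _first_present
def pvFirstPresent (symbols : List String) (formula : String) : String :=
  match symbols with
  | [] => ""
  | s :: rest => if PySem.Str.isIn s formula then s else pvFirstPresent rest formula

def get_metals_alt (formula : String) : String × String :=
  (pvFirstPresent pvMetalTable formula, pvFirstPresent pvMetalTable.reverse formula)

-- ===== PRECONDITION & SPEC =====
def Spec_get_metals (formula : String) (out : String × String) : Prop := out = get_metals_alt formula
instance (formula : String) (out : String × String) : Decidable (Spec_get_metals formula out) := by unfold Spec_get_metals; infer_instance

-- ===== CLAIM =====
def Claim_equal_get_metals : Prop := ∀ (formula : String), Dom_get_metals formula → Spec_get_metals formula (get_metals formula)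

-- ===== LEMMAS AND PROOFS =====

-- B's search is List.find? with a "" default
theorem pvFirstPresent_eq_find? (p : String → Bool) (l : List String) (formula : String)
    (hp : p = fun m => PySem.Str.isIn m formula) :
    pvFirstPresent l formula = (l.find? p).getD "" := by
  subst hp
  induction l with
  | nil => rfl
  | cons s rest ih =>
    by_cases h : PySem.Str.isIn s formula = true
    · rw [pvFirstPresent, if_pos h, List.find?_cons_of_pos (p := fun m => PySem.Str.isIn m formula) (l := rest) (by simpa using h)]; rfl
    · rw [pvFirstPresent, if_neg h, List.find?_cons_of_neg (p := fun m => PySem.Str.isIn m formula) (l := rest) (by simpa using h), ih]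

-- A's loop body, abstracted over the match test
def pvStep (p : String → Bool) (acc : String × String) (m : String) : String × String :=
  if p m then (if acc.1 == "" then (m, acc.2) else (acc.1, m)) else acc

-- no element matches: the fold keeps its state
theorem pvFoldl_no_match (p : String → Bool) (l : List String) (s : String × String)
    (h : ∀ m ∈ l, ¬ p m = true) : l.foldl (pvStep p) s = s := by
  induction l generalizing s with
  | nil => rfl
  | cons m t ih =>
    have hm : ¬ p m = true := h m (List.mem_cons_self)
    simp [List.foldl_cons, pvStep, hm]
    exact ih s (fun x hx => h x (List.mem_cons_of_mem _ hx))

-- once the first component is a nonempty symbol, the fold fixes it and the second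
-- component ends up as the last match (i.e. the first match of the reversed list)
theorem pvFoldl_after_first (p : String → Bool) (l : List String) (x y : String)
    (hx : ¬ x = "") : l.foldl (pvStep p) (x, y) = (x, (l.reverse.find? p).getD y) := by
  induction l generalizing y with
  | nil => simp
  | cons m t ih =>
    have hx' : (x == "") = false := by simpa using hx
    by_cases hm : p m = true
    · rw [List.foldl_cons, show pvStep p (x, y) m = (x, m) from by simp [pvStep, hm, hx'], ih m]
      simp only [List.reverse_cons, List.find?_append]
      cases h : t.reverse.find? p <;> simp_all
    · rw [List.foldl_cons, show pvStep p (x, y) m = (x, y) from by simp [pvStep, hm], ih y]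
      simp only [List.reverse_cons, List.find?_append]
      cases h : t.reverse.find? p <;> simp_all

-- B's word table is exactly A's literal list
theorem pvMetalTable_eq : pvMetalTable = ["Li", "Be", "Na", "Mg", "Al", "K", "Ca", "Sc", "Ti", "V", "Cr", "Mn", "Fe", "Co", "Ni", "Cu", "Zn", "Ga", "Rb", "Sr", "Y", "Zr", "Nb", "Mo", "Tc", "Ru", "Rh", "Pd", "Ag", "Cd", "In", "Sn", "Cs", "Ba", "La", "Ce", "Pr", "Nd", "Pm", "Sm", "Eu", "Gd", "Tb", "Dy", "Ho", "Er", "Tm", "Yb", "Lu", "Hf", "Ta", "W", "Re", "Os", "Ir", "Pt", "Au", "Hg", "Tl", "Pb", "Bi", "Po", "Fr", "Ra", "Ac", "Th", "Pa", "U", "Np", "Pu", "Am", "Cm", "Bk", "Cf", "Es", "Fm", "Md", "No", "Lr", "Rf", "Db", "Sg", "Bh", "Hs", "Mt", "Ds", "Rg", "Cn"] := by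
  set_option maxRecDepth 10000 in decide

-- every symbol in the metals table is a nonempty string
theorem pvMetals_ne_empty : ∀ m ∈ pvMetalTable, ¬ m = "" := by
  rw [pvMetalTable_eq]; decide

-- ===== VERDICT =====
theorem get_metals_spec : Claim_equal_get_metals := by
  intro formula _
  unfold Spec_get_metals get_metals get_metals_alt
  set p : String → Bool := fun m => PySem.Str.isIn m formula with hp
  rw [pvFirstPresent_eq_find? p _ formula rfl, pvFirstPresent_eq_find? p _ formula rfl,
    ← pvMetalTable_eq]
  have hstep : (fun (acc : String × String) m =>
      if PySem.Str.isIn m formula then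
        if acc.1 == "" then (m, acc.2) else (acc.1, m)
      else acc) = pvStep p := rfl
  rw [hstep]
  dsimp only
  cases hf : pvMetalTable.find? p with
  | none =>
    have hnone : ∀ m ∈ pvMetalTable, ¬ p m = true := by
      simpa using List.find?_eq_none.mp hf
    have hrev : pvMetalTable.reverse.find? p = none := by
      rw [List.find?_eq_none]; intro x hx; exact hnone x (List.mem_reverse.mp hx)
    simp [pvFoldl_no_match p pvMetalTable ("", "") hnone, hrev]
  | some m1 =>
    obtain ⟨hm1, as, bs, hsplit, hpre⟩ := List.find?_eq_some_iff_append.mp hf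
    have hm1mem : m1 ∈ pvMetalTable := by rw [hsplit]; exact List.mem_append_right _ List.mem_cons_self
    have hm1ne : ¬ m1 = "" := pvMetals_ne_empty m1 hm1mem
    have hm1ne' : (m1 == "") = false := by simpa using hm1ne
    have hfold : pvMetalTable.foldl (pvStep p) ("", "") = (m1, (bs.reverse.find? p).getD "") := by
      rw [hsplit, List.foldl_append,
        pvFoldl_no_match p as ("", "") (by intro x hx; simpa using hpre x hx),
        List.foldl_cons]
      have : pvStep p ("", "") m1 = (m1, "") := by simp [pvStep, hm1]
      rw [this, pvFoldl_after_first p bs m1 "" hm1ne]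
    have hrev : pvMetalTable.reverse.find? p = (bs.reverse.find? p).or (some m1) := by
      rw [hsplit]
      simp [List.find?_append, hm1]
    rw [hfold, hrev]
    dsimp only
    cases hb : bs.reverse.find? p with
    | none => simp
    | some v =>
      have hvmem : v ∈ pvMetalTable := by
        rw [hsplit]
        have : v ∈ bs.reverse := List.mem_of_find?_eq_some hb
        exact List.mem_append_right _ (List.mem_cons_of_mem _ (List.mem_reverse.mp this))
      have hvne : (v == "") = false := by simpa using pvMetals_ne_empty v hvmem
      simp [hvne]
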